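-- pv_equiv track=rewrite | github.com/ponczuTM/python-FST-on-pionter-machine | fastest_array_search_mean.py | threshold_search
-- ===== SOURCE A (Python) =====
-- def threshold_search(arr, target, threshold):
--     closest_value = None
--     min_difference = float('inf')
--     for value in arr:
--         difference = abs(value - target)
--         if difference <= threshold and difference < min_difference:
--             closest_value = value
--             min_difference = difference
--     if closest_value is not None:
--         return closest_value
--     else:
--         return arr[0]
-- ===== SOURCE B (Python) =====
-- def threshold_search(arr, target, threshold):
--     # Stable-sort by distance to target; the first element within threshold is the answer.
--     for v in sorted(arr, key=lambda v: abs(v - target)):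
--         if abs(v - target) <= threshold:
--             return v
--     return arr[0]
-- ===== Notes on version B (the rewrite author's own statement) =====
-- stated objective: alternative
-- what changed: Replaces A's fused single pass carrying a (closest_value, min_difference) accumulator with a sort-then-scan: stably sort the array by distance to target, then return the first element within threshold (stability makes sorted order respect A's first-wins strict-< tie-break), falling back to arr[0].
import Mathlib
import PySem

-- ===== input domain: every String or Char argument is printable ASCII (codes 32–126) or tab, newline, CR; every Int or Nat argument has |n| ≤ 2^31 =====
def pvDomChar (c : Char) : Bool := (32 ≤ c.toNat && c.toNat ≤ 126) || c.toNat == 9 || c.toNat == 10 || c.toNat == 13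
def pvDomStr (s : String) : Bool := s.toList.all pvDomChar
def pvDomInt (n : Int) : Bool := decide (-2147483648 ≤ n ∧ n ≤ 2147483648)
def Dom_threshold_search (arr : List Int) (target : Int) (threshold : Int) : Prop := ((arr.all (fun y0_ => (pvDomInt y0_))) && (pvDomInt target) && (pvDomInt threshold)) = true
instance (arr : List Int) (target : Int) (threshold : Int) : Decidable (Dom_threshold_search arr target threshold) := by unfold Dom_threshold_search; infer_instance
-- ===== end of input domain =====

-- B replaces A's fused single-pass running-minimum loop by a sort-then-scan: stably sort by
-- distance to target, return the first element within threshold; equivalence of the RETURN value on non-empty arr.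

-- ===== PORT A =====
-- state = (closest_value : Option Int, min_difference : Option Int); none = Python's None / float('inf')
def threshold_search (arr : List Int) (target : Int) (threshold : Int) : Int :=
  let st := arr.foldl
    (fun (s : Option Int × Option Int) value =>
      let difference := |value - target|
      if decide (difference ≤ threshold) && (match s.2 with | none => true | some m => decide (difference < m))
      then (some value, some difference) else s)
    (none, none)
  match st.1 with
  | some c => c
  | none => (PySem.List.pyGet? arr 0).getD 0   -- arr[0]; pyGet? = none (IndexError) excluded by Pre_

-- ===== PORT B =====
-- loop-with-early-return over sorted(arr, key=distance) = List.find?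
def threshold_search_alt (arr : List Int) (target : Int) (threshold : Int) : Int :=
  match (PySem.List.sorted arr (fun v => |v - target|)).find? (fun v => decide (|v - target| ≤ threshold)) with
  | some v => v
  | none => (PySem.List.pyGet? arr 0).getD 0   -- arr[0]; raise excluded by Pre_

-- ===== PRECONDITION & SPEC =====
-- Pre_ excludes only arr = [], on which both Pythons raise IndexError at arr[0].
def Pre_threshold_search (arr : List Int) (target : Int) (threshold : Int) : Prop := arr ≠ []
instance (arr : List Int) (target : Int) (threshold : Int) : Decidable (Pre_threshold_search arr target threshold) := by unfold Pre_threshold_search; infer_instance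
def pvWitness_threshold_search : List Int × Int × Int := ([3, 7, 5], 6, 2)

def Spec_threshold_search (arr : List Int) (target : Int) (threshold : Int) (out : Int) : Prop := out = threshold_search_alt arr target threshold
instance (arr : List Int) (target : Int) (threshold : Int) (out : Int) : Decidable (Spec_threshold_search arr target threshold out) := by unfold Spec_threshold_search; infer_instance

-- ===== CLAIM =====
def Claim_equal_threshold_search : Prop := ∀ (arr : List Int) (target : Int) (threshold : Int), Dom_threshold_search arr target threshold → Pre_threshold_search arr target threshold → Spec_threshold_search arr target threshold (threshold_search arr target threshold)

-- ===== LEMMAS AND PROOFS =====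

-- A's fused loop, started from a state (m, |m - target|), computes the first-wins min fold over the filtered list.
theorem pv_loop_eq (target threshold : Int) :
    ∀ (l : List Int) (m : Option Int),
      l.foldl
        (fun (s : Option Int × Option Int) value =>
          let difference := |value - target|
          if decide (difference ≤ threshold) && (match s.2 with | none => true | some m => decide (difference < m))
          then (some value, some difference) else s)
        (m, m.map (fun v => |v - target|))
      =
      (let q := (l.filter (fun v => decide (|v - target| ≤ threshold))).foldl
          (fun acc x => match acc with
            | none => some x
            | some w => if |x - target| < |w - target| then some x else some w) m
       (q, q.map (fun v => |v - target|))) := by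
  intro l
  induction l with
  | nil => intro m; rfl
  | cons x t ih =>
    intro m
    simp only [List.foldl_cons, List.filter_cons]
    by_cases hp : |x - target| ≤ threshold
    · cases m with
      | none =>
        simp only [Option.map_none, hp, decide_true, Bool.true_and, if_true]
        simpa using ih (some x)
      | some w =>
        by_cases hlt : |x - target| < |w - target|
        · simp only [Option.map_some, hp, hlt, decide_true, Bool.true_and, if_true]
          simpa [hlt] using ih (some x)
        · simp only [Option.map_some, hp, hlt, decide_true, decide_false,
            Bool.and_false]
          simpa [hlt] using ih (some w)
    · simp only [hp, decide_false, Bool.false_and]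
      cases m with
      | none => simpa using ih none
      | some w =>
        simp only [Option.map_some]
        exact ih (some w)

-- head of insertBy: x goes in front iff it beats the old head
theorem pv_head_insertBy (key : Int → Int) (x : Int) (l : List Int) :
    (PySem.List.insertBy (fun a b => decide (key a < key b)) x l).head? =
      some (match l with | [] => x | y :: _ => if key x < key y then x else y) := by
  cases l with
  | nil => simp [PySem.List.insertBy]
  | cons y ys =>
    by_cases h : key x < key y <;> simp [PySem.List.insertBy, h]

-- head of the stable sort is min?'s first minimal element
theorem pv_head_sorted (key : Int → Int) :
    ∀ xs : List Int, (PySem.List.sorted xs key).head? = PySem.List.min? xs key := by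
  intro xs
  induction xs using List.reverseRecOn with
  | nil => rfl
  | append_singleton t x ih =>
    rw [PySem.List.sorted_eq_foldl_insertBy] at ih ⊢
    simp only [PySem.List.min?, List.foldl_append, List.foldl_cons, List.foldl_nil] at ih ⊢
    rw [pv_head_insertBy]
    cases hL : (t.foldl (fun acc x => PySem.List.insertBy (fun a b => decide (key a < key b)) x acc) []) with
    | nil => rw [hL] at ih; simp at ih; rw [← ih]
    | cons y ys =>
      rw [hL] at ih; simp at ih; rw [← ih]
      by_cases h : key x < key y <;> simp [h]

-- find? of a downward-closed predicate on a key-sorted list is a head test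
theorem pv_find_pairwise (key : Int → Int) (t : Int) :
    ∀ l : List Int, l.Pairwise (fun a b => key a ≤ key b) →
      l.find? (fun v => decide (key v ≤ t)) =
        (match l.head? with | none => none | some h => if key h ≤ t then some h else none) := by
  intro l hp
  cases l with
  | nil => rfl
  | cons h tl =>
    rw [List.pairwise_cons] at hp
    by_cases hh : key h ≤ t
    · simp [hh]
    · simp only [List.find?_cons, hh, decide_false, List.head?_cons, if_false]
      rw [List.find?_eq_none]
      intro y hy
      have := hp.1 y hy
      simp only [decide_eq_true_eq]
      omega

-- projecting a first-wins min accumulator through the threshold test commutes with filtering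
theorem pv_min_filter (key : Int → Int) (t : Int) :
    ∀ (xs : List Int) (a : Option Int),
      (xs.filter (fun v => decide (key v ≤ t))).foldl
        (fun acc x => match acc with
          | none => some x
          | some w => if key x < key w then some x else some w)
        (match a with | none => none | some m => if key m ≤ t then some m else none)
      = (match xs.foldl
            (fun acc x => match acc with
              | none => some x
              | some w => if key x < key w then some x else some w) a with
         | none => none | some m => if key m ≤ t then some m else none) := by
  intro xs
  induction xs with
  | nil => intro a; rfl
  | cons x xs ih =>
    intro a
    simp only [List.filter_cons, List.foldl_cons]
    by_cases hx : key x ≤ t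
    · simp only [hx, decide_true, if_true, List.foldl_cons]
      cases a with
      | none => simpa [hx] using ih (some x)
      | some m =>
        by_cases hm : key m ≤ t
        · by_cases hlt : key x < key m
          · simpa [hm, hlt, hx] using ih (some x)
          · simpa [hm, hlt] using ih (some m)
        · have hlt : key x < key m := by omega
          simpa [hm, hlt, hx] using ih (some x)
    · simp only [hx, decide_false, Bool.false_eq_true, if_false]
      cases a with
      | none => simpa [hx] using ih (some x)
      | some m =>
        by_cases hm : key m ≤ t
        · have hlt : ¬ key x < key m := by omega
          simpa [hm, hlt] using ih (some m)
        · by_cases hlt : key x < key m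
          · simpa [hm, hlt, hx] using ih (some x)
          · simpa [hm, hlt] using ih (some m)

-- the fused-min fold over the filtered list, via the threshold test on the global first minimum
theorem pv_min_filter_none (target threshold : Int) (arr : List Int) :
    (arr.filter (fun v => decide (|v - target| ≤ threshold))).foldl
        (fun acc x => match acc with
          | none => some x
          | some w => if |x - target| < |w - target| then some x else some w) none
      = (match PySem.List.min? arr (fun v => |v - target|) with
         | none => none | some m => if |m - target| ≤ threshold then some m else none) := by
  have hmin : PySem.List.min? arr (fun v => |v - target|) =
      arr.foldl (fun acc x => match acc with
        | none => some x
        | some w => if |x - target| < |w - target| then some x else some w) none := by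
    unfold PySem.List.min?
    congr 1
    funext acc x
    cases acc <;> rfl
  rw [hmin]
  simpa using pv_min_filter (fun v => |v - target|) threshold arr none

-- ===== VERDICT =====
theorem threshold_search_spec : Claim_equal_threshold_search := by
  intro arr target threshold _ _
  unfold Spec_threshold_search threshold_search threshold_search_alt
  have h := pv_loop_eq target threshold arr none
  simp only [Option.map_none] at h
  rw [h]
  dsimp only
  rw [pv_find_pairwise (fun v => |v - target|) threshold _
        (PySem.List.sorted_pairwise arr (fun v => |v - target|))]
  rw [pv_head_sorted]
  rw [pv_min_filter_none]
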